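-- pv_equiv track=rewrite | github.com/agorinenko/algorithms | leet_code/array_and_string/group_anagrams.py | _encode_anagram
-- ===== SOURCE A (Python) =====
-- import collections
-- from typing import List, Union
--
-- def _encode_anagram(s: str) -> Union[str, tuple]:
--     """
--     ddddgge ->d4g2e
--     """
--     map = collections.defaultdict(int)
--     for c in s:
--         map[c] += 1
--
--     arr = []
--     sorted_keys = sorted(map.keys())
--     for k in sorted_keys:
--         arr.append(k)
--         arr.append(str(map[k]))
--
--     return ''.join(arr)
-- ===== SOURCE B (Python) =====
-- def _encode_anagram(s: str):
--     """Sort the characters, then emit run-length codes of the sorted sequence."""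
--     def run(t):
--         if not t:
--             return ''
--         c = t[0]
--         k = 1
--         while k < len(t) and t[k] == c:
--             k += 1
--         return c + str(k) + run(t[k:])
--     return run(sorted(s))
-- ===== Notes on version B (the rewrite author's own statement) =====
-- stated objective: alternative
-- what changed: B sorts the characters and run-length-encodes the consecutive runs of the sorted sequence, instead of counting occurrences into a dict and then iterating over its sorted distinct keys.
import Mathlib
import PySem

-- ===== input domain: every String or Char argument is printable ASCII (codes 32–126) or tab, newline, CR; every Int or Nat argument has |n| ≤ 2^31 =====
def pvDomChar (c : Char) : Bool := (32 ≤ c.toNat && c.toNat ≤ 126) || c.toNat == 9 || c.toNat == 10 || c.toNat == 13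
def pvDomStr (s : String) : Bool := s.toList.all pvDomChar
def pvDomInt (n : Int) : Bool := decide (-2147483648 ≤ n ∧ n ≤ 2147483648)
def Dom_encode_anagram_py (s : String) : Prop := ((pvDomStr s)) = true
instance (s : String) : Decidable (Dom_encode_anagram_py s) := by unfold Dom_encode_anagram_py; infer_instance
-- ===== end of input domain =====

-- B sorts the characters and run-length-encodes the sorted sequence, instead of
-- counting into a dict and sorting the distinct keys (objective: alternative).


-- ===== PORT A =====
-- strings are ported as List Char (PySem.Chars); ''.join(arr) is PySem.Chars.join []
def encode_anagram_py (s : String) : String :=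
  let map : PySem.Dict Char Int := s.toList.foldl (fun d c => d.modify c 0 (· + 1)) PySem.Dict.empty
  let sorted_keys := PySem.List.sorted map.keys (fun k => k) false
  let arr := sorted_keys.foldl (fun arr k => (arr ++ [[k]]) ++ [PySem.Int.toChars (map.getD k 0)])
    ([] : List (List Char))
  String.ofList (PySem.Chars.join [] arr)

-- ===== PORT B =====
-- the 'while k < len(t) and t[k] == c' loop of Source B: length of the run of c at the front of t[1:]
def pvRunLen (c : Char) : List Char → Nat
  | [] => 0
  | x :: xs => if x = c then pvRunLen c xs + 1 else 0

-- the recursive helper 'run' of Source B, on List Char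
def pvRun : List Char → List Char
  | [] => []
  | c :: rest =>
      let k := 1 + pvRunLen c rest
      c :: (PySem.Int.toChars (k : Int) ++ pvRun ((c :: rest).drop k))
  termination_by t => t.length
  decreasing_by
    simp only [List.length_drop, List.length_cons]
    omega

def encode_anagram_py_alt (s : String) : String :=
  String.ofList (pvRun (PySem.List.sorted s.toList (fun x => x) false))

-- ===== PRECONDITION & SPEC =====
def Spec_encode_anagram_py (s : String) (out : String) : Prop := out = encode_anagram_py_alt s
instance (s : String) (out : String) : Decidable (Spec_encode_anagram_py s out) := by unfold Spec_encode_anagram_py; infer_instance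

-- ===== CLAIM (what is proved, stated in full; the proofs are below) =====
def Claim_equal_encode_anagram_py : Prop := ∀ (s : String), Dom_encode_anagram_py s → Spec_encode_anagram_py s (encode_anagram_py s)

-- ===== LEMMAS AND PROOFS =====

-- splitting off the leading run: rest = (run of c) ++ remainder, remainder does not start with c
theorem pvRunLen_split (c : Char) (rest : List Char) :
    rest = List.replicate (pvRunLen c rest) c ++ rest.drop (pvRunLen c rest) ∧
      (∀ x ∈ (rest.drop (pvRunLen c rest)).head?, x ≠ c) := by
  induction rest with
  | nil => simp [pvRunLen]
  | cons x xs ih =>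
      by_cases h : x = c
      · subst h
        simpa [pvRunLen, List.replicate_succ] using ih
      · simp [pvRunLen, h]

-- the main bridge, for any ≤-sorted list t:
-- run-length encoding of t = flatMap over the <-sorted distinct keys of (key ++ str(count))
theorem pvRun_eq_flatMap (t : List Char) (hs : t.Pairwise (· ≤ ·)) :
    pvRun t = (PySem.List.sorted (PySem.Set.ofList t) (fun k => k) false).flatMap
        (fun k => k :: PySem.Int.toChars ((t.count k : Nat) : Int)) := by
  induction t using pvRun.induct with
  | case1 => simp [pvRun]
  | case2 c rest k ih =>
    obtain ⟨hrest, hhead⟩ := pvRunLen_split c rest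
    have hcle : ∀ y ∈ rest, c ≤ y := (List.pairwise_cons.mp hs).1
    have hsorted' : (rest.drop (pvRunLen c rest)).Pairwise (· ≤ ·) :=
      ((List.pairwise_cons.mp hs).2).sublist (List.drop_sublist _ _)
    -- every element after the leading run is > c
    have hgt : ∀ y ∈ rest.drop (pvRunLen c rest), c < y := by
      cases hdrop : rest.drop (pvRunLen c rest) with
      | nil => intro y hy; simp at hy
      | cons h tl =>
          intro y hy
          have hhc : h ≠ c := by rw [hdrop] at hhead; simpa using hhead
          have hhr : h ∈ rest := List.mem_of_mem_drop (by rw [hdrop]; simp)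
          have hch : c < h := lt_of_le_of_ne (hcle h hhr) (Ne.symm hhc)
          have hst : (h :: tl).Pairwise (· ≤ ·) := hdrop ▸ hsorted'
          rcases List.mem_cons.mp hy with rfl | hmem
          · exact hch
          · exact lt_of_lt_of_le hch ((List.pairwise_cons.mp hst).1 y hmem)
    have hnotmem : c ∉ rest.drop (pvRunLen c rest) := fun h => lt_irrefl c (hgt c h)
    -- the sorted distinct keys of c :: rest are c followed by those of the remainder
    have hkeys : PySem.List.sorted (PySem.Set.ofList (c :: rest)) (fun k => k) false
        = c :: PySem.List.sorted (PySem.Set.ofList (rest.drop (pvRunLen c rest))) (fun k => k) false := by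
      apply PySem.List.sorted_eq_of_perm_of_pairwise_lt
      · -- both sides are nodup with the same members
        apply (List.perm_ext_iff_of_nodup _ (PySem.Set.nodup_ofList _)).mpr
        · intro x
          constructor
          · intro hx
            rcases List.mem_cons.mp hx with rfl | hx'
            · simp [PySem.Set.mem_ofList]
            · have : x ∈ rest.drop (pvRunLen c rest) := by
                simpa [PySem.List.mem_sorted, PySem.Set.mem_ofList] using hx'
              simp only [PySem.Set.mem_ofList, List.mem_cons]
              exact Or.inr (List.mem_of_mem_drop this)
          · intro hx
            rcases List.mem_cons.mp (by simpa [PySem.Set.mem_ofList] using hx) with rfl | hx'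
            · exact List.mem_cons_self
            · conv at hx' => rw [hrest]
              rcases List.mem_append.mp hx' with hrep | hx''
              · rw [List.eq_of_mem_replicate hrep]; exact List.mem_cons_self
              · exact List.mem_cons_of_mem _
                  (by simpa [PySem.List.mem_sorted, PySem.Set.mem_ofList] using hx'')
        · exact List.nodup_cons.mpr ⟨fun hc =>
              hnotmem (by simpa [PySem.List.mem_sorted, PySem.Set.mem_ofList] using hc),
            List.Nodup.perm (PySem.Set.nodup_ofList _) (PySem.List.sorted_perm _ _ _).symm⟩
      · exact List.pairwise_cons.mpr ⟨fun y hy =>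
          hgt y (by simpa [PySem.List.mem_sorted, PySem.Set.mem_ofList] using hy),
          PySem.List.sorted_ofList_pairwise_lt _⟩
    -- counts
    have hcount_c : (c :: rest).count c = pvRunLen c rest + 1 := by
      conv_lhs => rw [hrest]
      simp [List.count_append,
        List.count_eq_zero_of_not_mem hnotmem]
    have hcount_ne : ∀ x, x ≠ c →
        (c :: rest).count x = (rest.drop (pvRunLen c rest)).count x := by
      intro x hx
      conv_lhs => rw [hrest]
      simp [List.count_append, List.count_replicate, Ne.symm hx]
    have hdropk : (c :: rest).drop (1 + pvRunLen c rest) = rest.drop (pvRunLen c rest) := by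
      rw [Nat.add_comm]; simp
    have hk : k = 1 + pvRunLen c rest := rfl
    rw [hk] at ih
    simp only [hdropk] at ih
    simp only [pvRun, hdropk, hkeys, List.flatMap_cons]
    rw [ih hsorted', hcount_c]
    have hmap : List.flatMap
          (fun x => x :: PySem.Int.toChars ((List.count x (rest.drop (pvRunLen c rest)) : Nat) : Int))
          (PySem.List.sorted (PySem.Set.ofList (rest.drop (pvRunLen c rest))) (fun k => k) false)
        = List.flatMap
          (fun x => x :: PySem.Int.toChars ((List.count x (c :: rest) : Nat) : Int))
          (PySem.List.sorted (PySem.Set.ofList (rest.drop (pvRunLen c rest))) (fun k => k) false) :=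
      List.flatMap_congr (fun x hx => by
        have hxt : x ∈ rest.drop (pvRunLen c rest) := by
          simpa [PySem.List.mem_sorted, PySem.Set.mem_ofList] using hx
        rw [hcount_ne x (fun h => hnotmem (h ▸ hxt))])
    rw [hmap, Nat.add_comm 1 (pvRunLen c rest)]
    simp

-- ''.join(arr) with empty separator is flatten
theorem join_nil_eq_flatten (L : List (List Char)) : PySem.Chars.join [] L = L.flatten := by
  induction L with
  | nil => rfl
  | cons x xs ih =>
      have h : List.intercalate ([] : List Char) (x :: xs) = x ++ List.intercalate [] xs := by
        cases xs <;> simp [List.intercalate]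
      simpa [PySem.Chars.join, h] using congrArg (x ++ ·) ih

-- ===== VERDICT (by name: the statement is the Claim_ definition above) =====
-- flattening A's two-entries-per-key list gives B's key-cons-digits list
theorem flatten_pairs (l : List Char) (f : Char → List Char) :
    (List.flatMap (fun k => [[k], f k]) l).flatten = List.flatMap (fun k => k :: f k) l := by
  induction l with
  | nil => rfl
  | cons x xs ih => simp [List.flatMap_cons, ih]

theorem encode_anagram_py_spec : Claim_equal_encode_anagram_py := by
  intro s _
  unfold Spec_encode_anagram_py encode_anagram_py encode_anagram_py_alt
  -- A's counting loop is Counter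
  rw [show (s.toList.foldl (fun d c => d.modify c 0 (· + 1)) PySem.Dict.empty)
      = PySem.Dict.counter s.toList from rfl]
  -- A's append loop is a flatMap over the sorted keys
  simp only [List.append_assoc, List.cons_append, List.nil_append]
  rw [PySem.List.foldl_append_eq_flatMap
      (g := fun k => [[k], PySem.Int.toChars ((PySem.Dict.counter s.toList).getD k 0)]),
    List.nil_append, join_nil_eq_flatten, flatten_pairs]
  -- B's run-length encoding of the sorted characters, via the bridge lemma
  have hperm : (PySem.List.sorted s.toList (fun x => x) false).Perm s.toList :=
    PySem.List.sorted_perm _ _ _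
  have hkeys : PySem.List.sorted (PySem.Set.ofList (PySem.List.sorted s.toList (fun x => x) false)) (fun k => k) false
      = PySem.List.sorted (PySem.Set.ofList s.toList) (fun k => k) false := by
    apply PySem.List.sorted_eq_sorted_of_perm _ _ _ (fun a b h => h)
    apply (List.perm_ext_iff_of_nodup (PySem.Set.nodup_ofList _) (PySem.Set.nodup_ofList _)).mpr
    intro x
    simp only [PySem.Set.mem_ofList]
    exact hperm.mem_iff
  rw [pvRun_eq_flatMap _ (by simpa using PySem.List.sorted_pairwise s.toList (fun x => x)), hkeys]
  rw [PySem.Dict.keys_counter]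
  congr 1
  apply List.flatMap_congr
  intro x hx
  rw [PySem.Dict.getD_counter, hperm.count_eq x]
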